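-- pv_equiv track=rewrite | github.com/gnawH/Algorithm | 프로그래머스/0/181918. 배열 만들기 4/배열 만들기 4.py | solution
-- ===== SOURCE A (Python) =====
-- def solution(arr):
--     result = []
--     i = 0
--     while i < len(arr):
--         if len(result) == 0:
--             result.append(arr[i])
--             i += 1
--         elif result[-1] < arr[i]:
--             result.append(arr[i])
--             i += 1
--         else:
--             result.pop()
--     return result
-- ===== SOURCE B (Python) =====
-- def solution(arr):
--     # An element survives the stack process iff it is strictly smaller than
--     # every later element, so a right-to-left running-minimum scan suffices.
--     result = []
--     lo = None
--     for x in reversed(arr):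
--         if lo is None or x < lo:
--             result.append(x)
--             lo = x
--     result.reverse()
--     return result
-- ===== Notes on version B (the rewrite author's own statement) =====
-- stated objective: alternative
-- what changed: Replaces the stack simulation (push, and pop while top >= current) with a right-to-left running-minimum scan: an element is kept iff it is strictly below the minimum of everything after it, so no stack and no pops are needed.
import Mathlib
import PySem

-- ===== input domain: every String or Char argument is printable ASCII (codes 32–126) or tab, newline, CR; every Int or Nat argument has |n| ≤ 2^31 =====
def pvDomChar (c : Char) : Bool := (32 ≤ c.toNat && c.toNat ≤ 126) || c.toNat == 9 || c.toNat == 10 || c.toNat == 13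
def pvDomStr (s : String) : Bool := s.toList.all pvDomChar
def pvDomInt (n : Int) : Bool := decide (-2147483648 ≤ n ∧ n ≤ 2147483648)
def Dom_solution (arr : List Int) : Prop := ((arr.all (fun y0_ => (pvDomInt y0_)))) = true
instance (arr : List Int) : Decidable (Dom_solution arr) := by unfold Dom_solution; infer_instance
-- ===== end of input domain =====

-- B replaces A's stack simulation (pop while top >= current, then push) with a
-- right-to-left running-minimum scan: keep x iff x < minimum of everything after it.

-- ===== PORT A =====
-- A's while-loop with index i and stack `result` (append/pop at the end, as in Python).
def solutionLoop (arr : List Int) (i : Nat) (result : List Int) : List Int :=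
  if h : i < arr.length then
    if hr : result = [] then
      solutionLoop arr (i + 1) (result ++ [arr[i]])
    else if result.getLast! < arr[i] then
      solutionLoop arr (i + 1) (result ++ [arr[i]])
    else
      solutionLoop arr i result.dropLast
  else result
termination_by 2 * (arr.length - i) + result.length
decreasing_by
  · simp; omega
  · simp; omega
  · have : 0 < result.length := List.length_pos_iff.mpr hr
    simp [List.length_dropLast]; omega

def solution (arr : List Int) : List Int := solutionLoop arr 0 []

-- ===== PORT B =====
-- for x in reversed(arr): if lo is None or x < lo: result.append(x); lo = x; then result.reverse()
def solution_alt (arr : List Int) : List Int :=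
  (arr.reverse.foldl
    (fun (st : Option Int × List Int) x =>
      match st.1 with
      | none => (some x, st.2 ++ [x])
      | some lo => if x < lo then (some x, st.2 ++ [x]) else st)
    (none, [])).2.reverse

-- ===== PRECONDITION & SPEC =====
def Spec_solution (arr : List Int) (out : List Int) : Prop := out = solution_alt arr
instance (arr : List Int) (out : List Int) : Decidable (Spec_solution arr out) := by unfold Spec_solution; infer_instance

-- ===== CLAIM (what is proved, stated in full; the proofs are below) =====
def Claim_equal_solution : Prop := ∀ (arr : List Int), Dom_solution arr → Spec_solution arr (solution arr)

-- ===== LEMMAS AND PROOFS =====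

-- the kept elements: those strictly below every later element
def keep : List Int → List Int
  | [] => []
  | x :: xs => if xs.all (fun y => decide (x < y)) then x :: keep xs else keep xs

-- proof-only model of A's pop branch
def popWhile (x : Int) : List Int → List Int
  | [] => []
  | t :: rest => if t ≥ x then popWhile x rest else t :: rest

theorem getLast!_concat_int (l : List Int) (a : Int) : (l ++ [a]).getLast! = a := by
  cases l with
  | nil => rfl
  | cons b bs => simp [List.getLast!]

-- one "push step" of A (the stalled pops followed by the append) as pop-then-push
theorem solutionLoop_step (arr : List Int) (i : Nat) (h : i < arr.length) (s : List Int) :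
    solutionLoop arr i s.reverse
      = solutionLoop arr (i + 1) (arr[i] :: popWhile arr[i] s).reverse := by
  induction s with
  | nil =>
    rw [solutionLoop]
    simp [h, popWhile]
  | cons t rest ih =>
    rw [solutionLoop]
    have hne : (t :: rest).reverse ≠ [] := by simp
    have hlast : (t :: rest).reverse.getLast! = t := by
      rw [List.reverse_cons]; exact getLast!_concat_int _ _
    rw [dif_pos h, dif_neg hne, hlast]
    by_cases hc : t < arr[i]
    · rw [if_pos hc]
      simp [popWhile, show ¬ t ≥ arr[i] by omega, List.reverse_cons]
    · have hdrop : (t :: rest).reverse.dropLast = rest.reverse := by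
        simp [List.reverse_cons]
      rw [if_neg hc, hdrop, ih]
      simp [popWhile, show t ≥ arr[i] by omega]

-- A's loop from index i with stack s.reverse = a fold over the remaining elements
theorem solutionLoop_eq_foldl (arr : List Int) (i : Nat) (s : List Int) :
    solutionLoop arr i s.reverse
      = ((arr.drop i).foldl (fun st x => x :: popWhile x st) s).reverse := by
  by_cases h : i < arr.length
  · rw [List.drop_eq_getElem_cons h]
    simp only [List.foldl_cons]
    rw [solutionLoop_step arr i h s]
    exact solutionLoop_eq_foldl arr (i + 1) (arr[i] :: popWhile arr[i] s)
  · rw [solutionLoop]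
    simp [h, List.drop_eq_nil_of_le (by omega : arr.length ≤ i)]
termination_by arr.length - i
decreasing_by omega

theorem keep_cons (x : Int) (xs : List Int) :
    keep (x :: xs) = if xs.all (fun y => decide (x < y)) then x :: keep xs else keep xs := rfl

theorem keep_subset (l : List Int) : ∀ y ∈ keep l, y ∈ l := by
  induction l with
  | nil => simp [keep]
  | cons x xs ih =>
    intro y hy
    rw [keep_cons] at hy
    split at hy
    · rcases List.mem_cons.mp hy with hy | hy
      · simp [hy]
      · exact List.mem_cons_of_mem _ (ih y hy)
    · exact List.mem_cons_of_mem _ (ih y hy)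

theorem keep_pairwise (l : List Int) : (keep l).Pairwise (· < ·) := by
  induction l with
  | nil => exact List.Pairwise.nil
  | cons x xs ih =>
    unfold keep
    split
    · rename_i hall
      refine List.Pairwise.cons ?_ ih
      intro y hy
      have := keep_subset xs y hy
      simpa using List.all_eq_true.mp hall y this
    · exact ih

theorem keep_ne_nil (l : List Int) (h : l ≠ []) : keep l ≠ [] := by
  induction l with
  | nil => exact absurd rfl h
  | cons x xs ih =>
    unfold keep
    split
    · simp
    · rename_i hall
      have hxs : xs ≠ [] := by
        intro he; subst he; simp at hall
      exact ih hxs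

-- the head of keep l is a lower bound for l
theorem keep_head_le (l : List Int) (h : Int) (hh : (keep l).head? = some h) :
    ∀ y ∈ l, h ≤ y := by
  induction l with
  | nil => simp [keep] at hh
  | cons x xs ih =>
    rw [keep_cons] at hh
    split at hh
    · rename_i hall
      simp at hh
      subst hh
      intro y hy
      rcases List.mem_cons.mp hy with hy | hy
      · omega
      · have := List.all_eq_true.mp hall y hy
        simp at this; omega
    · rename_i hall
      intro y hy
      rcases List.mem_cons.mp hy with hy | hy
      · subst hy
        simp [List.all_eq_true] at hall
        obtain ⟨z, hz, hzle⟩ := hall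
        exact le_trans (ih hh z hz) hzle
      · exact ih hh y hy

theorem popWhile_filter (x : Int) (l : List Int) (hs : l.Pairwise (· > ·)) :
    popWhile x l = l.filter (fun y => decide (y < x)) := by
  induction l with
  | nil => rfl
  | cons t rest ih =>
    unfold popWhile
    by_cases hc : t ≥ x
    · rw [if_pos hc, ih (List.Pairwise.sublist (List.sublist_cons_self t rest) hs)]
      simp [show ¬ t < x by omega]
    · rw [if_neg hc]
      have : ∀ y ∈ rest, y < x := by
        intro y hy
        have := (List.pairwise_cons.mp hs).1 y hy
        omega
      rw [List.filter_cons_of_pos (by simp; omega)]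
      congr 1
      rw [List.filter_eq_self.mpr]
      intro y hy; simp [this y hy]

theorem keep_snoc (p : List Int) (x : Int) :
    keep (p ++ [x]) = (keep p).filter (fun y => decide (y < x)) ++ [x] := by
  induction p with
  | nil => simp [keep]
  | cons y p ih =>
    simp only [List.cons_append]
    rw [keep_cons, keep_cons, ih]
    by_cases hall : p.all (fun z => decide (y < z)) = true
    · by_cases hx : y < x
      · have h2 : (p ++ [x]).all (fun z => decide (y < z)) = true := by
          simp only [List.all_eq_true] at hall ⊢
          intro z hz
          rcases List.mem_append.mp hz with hz | hz
          · exact hall z hz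
          · simp at hz; subst hz; simpa using hx
        rw [if_pos h2, if_pos hall, List.filter_cons_of_pos (by simpa using hx)]
        simp
      · have h2 : ¬ (p ++ [x]).all (fun z => decide (y < z)) = true := by
          simp only [List.all_eq_true]
          intro hc
          exact hx (by simpa using hc x (by simp))
        rw [if_neg h2, if_pos hall, List.filter_cons_of_neg (by simpa using hx)]
    · have h2 : ¬ (p ++ [x]).all (fun z => decide (y < z)) = true := by
        simp only [List.all_eq_true] at hall ⊢
        intro hc
        exact hall fun z hz => hc z (List.mem_append.mpr (Or.inl hz))
      rw [if_neg h2, if_neg hall]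

-- A's stack (top-first) after the whole array = reverse of the kept elements
theorem stack_eq_keep (arr : List Int) :
    arr.foldl (fun st x => x :: popWhile x st) [] = (keep arr).reverse := by
  induction arr using List.reverseRecOn with
  | nil => rfl
  | append_singleton p x ih =>
    rw [List.foldl_append, List.foldl_cons, List.foldl_nil, ih]
    rw [popWhile_filter x _ (by rw [List.pairwise_reverse]; exact keep_pairwise p)]
    rw [keep_snoc, List.reverse_append]
    simp [List.filter_reverse]

-- B's fold state after processing arr.reverse: (head of keep arr, reverse of keep arr)
theorem alt_fold_eq_keep (arr : List Int) :
    arr.reverse.foldl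
      (fun (st : Option Int × List Int) x =>
        match st.1 with
        | none => (some x, st.2 ++ [x])
        | some lo => if x < lo then (some x, st.2 ++ [x]) else st)
      (none, [])
      = ((keep arr).head?, (keep arr).reverse) := by
  induction arr with
  | nil => rfl
  | cons x rest ih =>
    rw [List.reverse_cons, List.foldl_append, ih, List.foldl_cons, List.foldl_nil]
    rcases hk : (keep rest).head? with _ | h
    · -- keep rest = [], hence rest = []
      have hre : rest = [] := by
        by_contra hne
        exact (keep_ne_nil rest hne) (List.head?_eq_none_iff.mp hk)
      subst hre
      simp [keep]
    · have hkr : keep rest ≠ [] := by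
        intro he; rw [he] at hk; simp at hk
      by_cases hx : x < h
      · have hall : rest.all (fun y => decide (x < y)) = true := by
          simp [List.all_eq_true]
          intro y hy
          have := keep_head_le rest h hk y hy
          omega
        simp only [if_pos hx]
        rw [keep_cons, if_pos hall]
        simp
      · have hmem : h ∈ rest := keep_subset rest h (List.mem_of_mem_head? hk)
        have hall : ¬ rest.all (fun y => decide (x < y)) = true := by
          simp [List.all_eq_true]
          exact ⟨h, hmem, by omega⟩
        simp only [if_neg hx]
        rw [keep_cons, if_neg hall, hk]

-- ===== VERDICT (by name: the statement is the Claim_ definition above) =====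
theorem solution_spec : Claim_equal_solution := by
  intro arr _
  unfold Spec_solution solution solution_alt
  rw [alt_fold_eq_keep]
  have h0 := solutionLoop_eq_foldl arr 0 []
  simp only [List.reverse_nil, List.drop_zero] at h0
  rw [h0, stack_eq_keep]
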